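-- pv_equiv track=rewrite | github.com/serpentk/adventofcode22025 | day10/day10_1.py | get_lights
-- ===== SOURCE A (Python) =====
-- def switch(c):
--     return '.' if c == '#' else '#'
--
-- def push(start, button):
--     return ''.join([switch(c) if i in button else c for i, c in enumerate(start)])
--
-- def get_lights(goal, buttons):
--     cur_count = 0
--     to_check = [([], '.' * len(goal))]
--     while cur_count < len(buttons):
--         for pressed, x in to_check:
--             if x == goal:
--                 return cur_count
--         newchecks = []
--         for pressed, x in to_check:
--             for i, b in enumerate(buttons):
--                 if pressed and i <= pressed[-1]:
--                     continue
--                 newchecks.append((pressed + [i], push(x, b)))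
--         to_check = newchecks
--         cur_count += 1
--     return cur_count
-- ===== SOURCE B (Python) =====
-- def switch(c):
--     return '.' if c == '#' else '#'
--
-- def push(start, button):
--     return ''.join([switch(c) if i in button else c for i, c in enumerate(start)])
--
-- def get_lights(goal, buttons):
--     n = len(buttons)
--     best = {'.' * len(goal): 0}
--     for b in buttons:
--         cur = dict(best)
--         for p, s in best.items():
--             q = push(p, b)
--             if s + 1 < cur.get(q, n + 1):
--                 cur[q] = s + 1
--         best = cur
--     return min(best.get(goal, n), n)
-- ===== Notes on version B (the rewrite author's own statement) =====
-- stated objective: alternative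
-- what changed: A does a breadth-first search over all increasing index combinations, carrying the pressed-index lists level by level; B keeps one dict mapping each distinct reachable light pattern to its minimal press count and folds each button into it once, so duplicate patterns collapse instead of multiplying (often much faster, but not when all 2^n patterns are distinct).
import Mathlib
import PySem

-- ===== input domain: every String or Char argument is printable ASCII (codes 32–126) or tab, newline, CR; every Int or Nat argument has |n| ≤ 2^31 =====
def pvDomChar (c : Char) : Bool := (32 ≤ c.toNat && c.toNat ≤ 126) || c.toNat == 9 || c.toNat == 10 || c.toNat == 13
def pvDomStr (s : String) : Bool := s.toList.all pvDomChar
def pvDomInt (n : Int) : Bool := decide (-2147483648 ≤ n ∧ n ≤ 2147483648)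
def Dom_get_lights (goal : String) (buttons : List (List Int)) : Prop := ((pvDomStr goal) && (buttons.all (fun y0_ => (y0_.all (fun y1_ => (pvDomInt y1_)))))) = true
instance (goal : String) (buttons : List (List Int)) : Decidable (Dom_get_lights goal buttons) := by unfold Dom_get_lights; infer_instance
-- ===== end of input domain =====

-- B replaces A's breadth-first enumeration of all index combinations by a dict-based
-- dynamic programme mapping each distinct reachable light pattern to its minimal press
-- count (a different algorithm; duplicate patterns collapse instead of multiplying).

-- ===== PORT A =====
def pySwitch (c : Char) : Char := if c = '#' then '.' else '#'

def pyPush (start : List Char) (button : List Int) : List Char :=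
  (PySem.List.enumerate start 0).map (fun ic => if button.contains ic.1 then pySwitch ic.2 else ic.2)

def glStep (buttons : List (List Int)) (tc : List (List Int × List Char)) : List (List Int × List Char) :=
  tc.flatMap (fun px =>
    (PySem.List.enumerate buttons 0).filterMap (fun ib =>
      if px.1 ≠ [] ∧ ib.1 ≤ PySem.List.pyGetD px.1 (-1) 0 then none
      else some (px.1 ++ [ib.1], pyPush px.2 ib.2)))

def glLoop (goal : List Char) (buttons : List (List Int)) : Nat → List (List Int × List Char) → Int → Int
  | 0, _, cur => cur
  | f+1, tc, cur => if tc.any (fun px => px.2 == goal) then cur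
      else glLoop goal buttons f (glStep buttons tc) (cur + 1)

def get_lights (goal : String) (buttons : List (List Int)) : Int :=
  glLoop goal.toList buttons buttons.length [([], List.replicate goal.toList.length '.')] 0

-- ===== PORT B =====
def glRound (n : Nat) (best : PySem.Dict (List Char) Int) (b : List Int) : PySem.Dict (List Char) Int :=
  best.items.foldl (fun cur ps =>
    if ps.2 + 1 < cur.getD (pyPush ps.1 b) ((n : Int) + 1)
    then cur.insert (pyPush ps.1 b) (ps.2 + 1) else cur) best

def get_lights_alt (goal : String) (buttons : List (List Int)) : Int :=
  let n := buttons.length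
  let best := buttons.foldl (glRound n) (PySem.Dict.ofList [(List.replicate goal.toList.length '.', (0 : Int))])
  min (best.getD goal.toList (n : Int)) (n : Int)

-- ===== PRECONDITION & SPEC =====
def Spec_get_lights (goal : String) (buttons : List (List Int)) (out : Int) : Prop := out = get_lights_alt goal buttons
instance (goal : String) (buttons : List (List Int)) (out : Int) : Decidable (Spec_get_lights goal buttons out) := by unfold Spec_get_lights; infer_instance

-- ===== CLAIM (what is proved, stated in full; the proofs are below) =====
def Claim_equal_get_lights : Prop := ∀ (goal : String) (buttons : List (List Int)), Dom_get_lights goal buttons → Spec_get_lights goal buttons (get_lights goal buttons)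

-- ===== LEMMAS AND PROOFS =====

-- minimum of two optional values
def omin : Option Int → Option Int → Option Int
  | none, y => y
  | x, none => x
  | some a, some b => some (min a b)

-- minimal recorded size among entries of l whose pattern is q
def msz : List (List Char × Int) → List Char → Option Int
  | [], _ => none
  | ps :: l, q => if ps.1 = q then omin (some ps.2) (msz l q) else msz l q

-- all (pattern, subset-size) pairs over subsets of the processed buttons
def step1 (b : List Int) (acc : List (List Char × Int)) : List (List Char × Int) :=
  acc ++ acc.map (fun ps => (pyPush ps.1 b, ps.2 + 1))

def allP (g : List Char) (bs : List (List Int)) : List (List Char × Int) :=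
  bs.foldl (fun acc b => step1 b acc) [(List.replicate g.length '.', 0)]

-- pattern obtained by pressing the buttons with indices S (in increasing order)
def applyC (g : List Char) (bs : List (List Int)) (S : List Nat) : List Char :=
  S.foldl (fun p i => pyPush p (bs.getD i [])) (List.replicate g.length '.')

-- strictly increasing list of button indices below m
def Comb (m : Nat) (S : List Nat) : Prop := S.Pairwise (· < ·) ∧ ∀ i ∈ S, i < m

def levelL (g : List Char) (bs : List (List Int)) : Nat → List (List Int × List Char)
  | 0 => [([], List.replicate g.length '.')]
  | k+1 => glStep bs (levelL g bs k)

def HasGoal (g : List Char) (bs : List (List Int)) (k : Nat) : Prop :=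
  ∃ S, Comb bs.length S ∧ S.length = k ∧ applyC g bs S = g

lemma omin_assoc (x y z : Option Int) : omin (omin x y) z = omin x (omin y z) := by
  cases x <;> cases y <;> cases z <;> simp [omin, min_assoc]

lemma msz_cons (p : List Char × Int) (l : List (List Char × Int)) (q : List Char) :
    msz (p :: l) q = if p.1 = q then omin (some p.2) (msz l q) else msz l q := rfl

lemma msz_append (l1 l2 : List (List Char × Int)) (q : List Char) :
    msz (l1 ++ l2) q = omin (msz l1 q) (msz l2 q) := by
  induction l1 with
  | nil => simp [msz, omin]
  | cons ps l ih =>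
    simp only [List.cons_append, msz, ih]
    split
    · rw [omin_assoc]
    · rfl

lemma msz_eq_none_iff (l : List (List Char × Int)) (q : List Char) :
    msz l q = none ↔ ∀ ps ∈ l, ps.1 ≠ q := by
  induction l with
  | nil => simp [msz]
  | cons ps l ih =>
    simp only [msz, List.mem_cons, forall_eq_or_imp]
    split
    · cases h : msz l q <;> simp_all [omin]
    · simp_all

lemma msz_eq_some_iff (l : List (List Char × Int)) (q : List Char) (m : Int) :
    msz l q = some m ↔ (∃ ps ∈ l, ps.1 = q ∧ ps.2 = m) ∧ (∀ ps ∈ l, ps.1 = q → m ≤ ps.2) := by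
  induction l generalizing m with
  | nil => simp [msz]
  | cons ps l ih =>
    simp only [msz, List.mem_cons]
    split
    · rename_i hq
      cases h : msz l q with
      | none =>
        rw [msz_eq_none_iff] at h
        simp only [omin, Option.some.injEq]
        constructor
        · rintro rfl
          refine ⟨⟨ps, Or.inl rfl, hq, rfl⟩, ?_⟩
          rintro p (rfl | hp) h2
          · rfl
          · exact absurd h2 (h p hp)
        · rintro ⟨⟨p, (rfl | hp), h1, h2⟩, hlb⟩
          · exact h2
          · exact absurd h1 (h p hp)
      | some m' =>
        simp only [omin, Option.some.injEq]
        rw [ih] at h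
        obtain ⟨⟨p', hp', hq', hv'⟩, hlb'⟩ := h
        constructor
        · rintro rfl
          rcases le_total ps.2 m' with hle | hle
          · rw [min_eq_left hle]
            refine ⟨⟨ps, Or.inl rfl, hq, rfl⟩, ?_⟩
            rintro p (rfl | hp) h2
            · rfl
            · exact le_trans hle (hlb' p hp h2)
          · rw [min_eq_right hle]
            refine ⟨⟨p', Or.inr hp', hq', hv'⟩, ?_⟩
            rintro p (rfl | hp) h2
            · exact hle
            · exact hlb' p hp h2
        · rintro ⟨⟨p, hp, h1, h2⟩, hlb⟩
          have h3 : m ≤ ps.2 := hlb ps (Or.inl rfl) hq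
          have h4 : m ≤ m' := by
            subst hv'
            exact hlb p' (Or.inr hp') hq'
          rcases hp with rfl | hp
          · omega
          · have := hlb' p hp h1
            omega
    · rename_i hq
      rw [ih]
      constructor
      · rintro ⟨⟨p, hp, h1, h2⟩, hlb⟩
        exact ⟨⟨p, Or.inr hp, h1, h2⟩, fun p hp' h' => by
          rcases hp' with rfl | hp' 
          · exact absurd h' hq
          · exact hlb p hp' h'⟩
      · rintro ⟨⟨p, hp, h1, h2⟩, hlb⟩
        rcases hp with rfl | hp
        · exact absurd h1 hq
        · exact ⟨⟨p, hp, h1, h2⟩, fun p hp' h' => hlb p (Or.inr hp') h'⟩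

-- the inner fold of one round of B, characterised

lemma round_fold (n : Nat) (b : List Int) :
    ∀ (it : List (List Char × Int)) (cur : PySem.Dict (List Char) Int),
      cur.keys.Nodup → (∀ ps ∈ it, ps.2 + 1 < (n : Int) + 1) →
      ((it.foldl (fun cur ps =>
          if ps.2 + 1 < cur.getD (pyPush ps.1 b) ((n : Int) + 1)
          then cur.insert (pyPush ps.1 b) (ps.2 + 1) else cur) cur).keys.Nodup ∧
       ∀ q, (it.foldl (fun cur ps =>
          if ps.2 + 1 < cur.getD (pyPush ps.1 b) ((n : Int) + 1)
          then cur.insert (pyPush ps.1 b) (ps.2 + 1) else cur) cur).get? q =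
          omin (cur.get? q) (msz (it.map (fun ps => (pyPush ps.1 b, ps.2 + 1))) q)) := by
  intro it
  induction it with
  | nil => intro cur hn _; exact ⟨hn, fun q => by cases h : cur.get? q <;> simp [msz, omin, h]⟩
  | cons ps it ih =>
    intro cur hn hb
    simp only [List.foldl_cons, List.map_cons]
    set q0 := pyPush ps.1 b with hq0
    by_cases hc : ps.2 + 1 < cur.getD q0 ((n : Int) + 1)
    · rw [if_pos hc]
      obtain ⟨rn, rg⟩ := ih (cur.insert q0 (ps.2 + 1)) (PySem.Dict.nodup_keys_insert _ _ _ hn)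
        (fun p hp => hb p (List.mem_cons_of_mem _ hp))
      refine ⟨rn, fun q => ?_⟩
      rw [rg q, PySem.Dict.get?_insert]
      show _ = omin (cur.get? q) (msz ((q0, ps.2 + 1) :: _) q)
      by_cases hq : q = q0
      · subst hq
        rw [if_pos rfl, msz_cons, if_pos rfl, ← omin_assoc]
        have key : omin (cur.get? q0) (some (ps.2 + 1)) = some (ps.2 + 1) := by
          cases h : cur.get? q0 with
          | none => simp [omin]
          | some t =>
            have : cur.getD q0 ((n:Int)+1) = t := PySem.Dict.getD_of_get?_eq_some _ _ h
            simp only [omin]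
            rw [min_eq_right (by omega)]
        rw [key]
      · rw [if_neg hq, msz_cons, if_neg (fun h => hq h.symm)]
    · rw [if_neg hc]
      obtain ⟨rn, rg⟩ := ih cur hn (fun p hp => hb p (List.mem_cons_of_mem _ hp))
      refine ⟨rn, fun q => ?_⟩
      rw [rg q]
      show _ = omin (cur.get? q) (msz ((q0, ps.2 + 1) :: _) q)
      by_cases hq : q = q0
      · subst hq
        rw [msz_cons, if_pos rfl, ← omin_assoc]
        have hblt : ps.2 + 1 < (n : Int) + 1 := hb ps (List.mem_cons_self ..)
        have key : omin (cur.get? q0) (some (ps.2 + 1)) = cur.get? q0 := by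
          cases h : cur.get? q0 with
          | none =>
            exfalso
            have : cur.getD q0 ((n:Int)+1) = (n:Int)+1 := PySem.Dict.getD_of_get?_eq_none _ _ h
            omega
          | some t =>
            have : cur.getD q0 ((n:Int)+1) = t := PySem.Dict.getD_of_get?_eq_some _ _ h
            simp only [omin]
            rw [min_eq_left (by omega)]
        rw [key]
      · rw [msz_cons, if_neg (fun h => hq h.symm)]

lemma msz_map_congr (b : List Int) (a : List (List Char × Int)) (d : PySem.Dict (List Char) Int)
    (hn : d.keys.Nodup) (hinv : ∀ q, d.get? q = msz a q) (q : List Char) :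
    msz (d.items.map (fun ps => (pyPush ps.1 b, ps.2 + 1))) q =
    msz (a.map (fun ps => (pyPush ps.1 b, ps.2 + 1))) q := by
  cases hr : msz (a.map (fun ps => (pyPush ps.1 b, ps.2 + 1))) q with
  | none =>
    rw [msz_eq_none_iff] at hr ⊢
    intro ps hps
    simp only [List.mem_map] at hps
    obtain ⟨⟨k, v⟩, hkv, rfl⟩ := hps
    -- (k,v) ∈ d.items → msz a k = some v → some entry of a has pattern k
    have hk : d.get? k = some v := PySem.Dict.get?_of_mem_items d hkv hn
    rw [hinv] at hk
    rw [msz_eq_some_iff] at hk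
    obtain ⟨⟨p, hp, hp1, hp2⟩, _⟩ := hk
    intro hpush
    exact hr _ (List.mem_map.mpr ⟨p, hp, rfl⟩) (by simpa [hp1] using hpush)
  | some m =>
    rw [msz_eq_some_iff] at hr ⊢
    obtain ⟨⟨ps', hps', hpq, hpv⟩, hlb⟩ := hr
    simp only [List.mem_map] at hps'
    obtain ⟨⟨k, s⟩, hks, heq⟩ := hps'
    have hk1 : pyPush k b = ps'.1 := by rw [← heq]
    have hk2 : s + 1 = ps'.2 := by rw [← heq]
    -- minimal value for pattern k in a
    have hne : msz a k ≠ none := by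
      intro hnone
      rw [msz_eq_none_iff] at hnone
      have hall := hnone
      exact hall (k, s) hks rfl
    obtain ⟨s', hs'⟩ := Option.ne_none_iff_exists'.mp hne
    have hs'' := hs'
    rw [msz_eq_some_iff] at hs''
    obtain ⟨⟨p', hp', hp'1, hp'2⟩, hlb'⟩ := hs''
    -- m ≤ s' + 1 (via entry (p', s') of a, which maps to pattern q)
    have hm1 : m ≤ s' + 1 := by
      have := hlb ((pyPush p'.1 b, p'.2 + 1)) (List.mem_map.mpr ⟨p', hp', rfl⟩)
        (by rw [hp'1, hk1, hpq])
      omega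
    have hs'le : s' ≤ s := hlb' (k, s) hks rfl
    have hm2 : s' + 1 = m := by omega
    constructor
    · refine ⟨(pyPush k b, s' + 1), ?_, by rw [hk1, hpq], hm2⟩
      refine List.mem_map.mpr ⟨(k, s'), ?_, rfl⟩
      exact PySem.Dict.mem_items_of_get?_eq_some d (by rw [hinv]; exact hs')
    · intro pp hpp hppq
      simp only [List.mem_map] at hpp
      obtain ⟨⟨k2, v2⟩, hk2i, rfl⟩ := hpp
      have : d.get? k2 = some v2 := PySem.Dict.get?_of_mem_items d hk2i hn
      rw [hinv, msz_eq_some_iff] at this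
      obtain ⟨⟨p2, hp2, hp21, hp22⟩, _⟩ := this
      have := hlb (pyPush p2.1 b, p2.2 + 1) (List.mem_map.mpr ⟨p2, hp2, rfl⟩)
        (by simpa [hp21] using hppq)
      simp only at this ⊢
      omega

lemma round_main (n : Nat) (b : List Int) (a : List (List Char × Int)) (d : PySem.Dict (List Char) Int)
    (hn : d.keys.Nodup) (hinv : ∀ q, d.get? q = msz a q)
    (hb : ∀ ps ∈ a, ps.2 < (n : Int)) :
    (glRound n d b).keys.Nodup ∧ ∀ q, (glRound n d b).get? q = msz (step1 b a) q := by
  have hitems : ∀ ps ∈ d.items, ps.2 + 1 < (n : Int) + 1 := by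
    rintro ⟨k, v⟩ hkv
    have : d.get? k = some v := PySem.Dict.get?_of_mem_items d hkv hn
    rw [hinv, msz_eq_some_iff] at this
    obtain ⟨⟨p, hp, _, hp2⟩, _⟩ := this
    have := hb p hp
    simp only
    omega
  obtain ⟨rn, rg⟩ := round_fold n b d.items d hn hitems
  refine ⟨rn, fun q => ?_⟩
  unfold glRound
  rw [rg q, hinv, msz_map_congr b a d hn hinv, step1, msz_append]

lemma Bfold (n : Nat) :
    ∀ (rest : List (List Int)) (a : List (List Char × Int)) (d : PySem.Dict (List Char) Int),
      d.keys.Nodup → (∀ q, d.get? q = msz a q) →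
      (∀ ps ∈ a, ps.2 + rest.length ≤ (n : Int)) →
      ∀ q, (rest.foldl (glRound n) d).get? q = msz (rest.foldl (fun acc b => step1 b acc) a) q := by
  intro rest
  induction rest with
  | nil => intro a d _ hinv _ q; simpa using hinv q
  | cons b rest ih =>
    intro a d hn hinv hb q
    simp only [List.foldl_cons]
    have hb' : ∀ ps ∈ a, ps.2 < (n : Int) := by
      intro ps hps
      have := hb ps hps
      simp only [List.length_cons] at this
      push_cast at this
      omega
    obtain ⟨rn, rg⟩ := round_main n b a d hn hinv hb'
    refine ih (step1 b a) (glRound n d b) rn rg ?_ q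
    intro ps hps
    simp only [List.length_cons] at hb
    unfold step1 at hps
    rcases List.mem_append.mp hps with hps | hps
    · have := hb ps hps; push_cast at this ⊢; omega
    · obtain ⟨p, hp, rfl⟩ := List.mem_map.mp hps
      have := hb p hp; push_cast at this ⊢
      show p.2 + 1 + _ ≤ _
      omega

lemma B_value (goal : String) (bs : List (List Int)) :
    get_lights_alt goal bs =
      min ((msz (allP goal.toList bs) goal.toList).getD (bs.length : Int)) (bs.length : Int) := by
  unfold get_lights_alt allP
  have h0 : ∀ q, (PySem.Dict.ofList [(List.replicate goal.toList.length '.', (0 : Int))]).get? q =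
      msz [(List.replicate goal.toList.length '.', 0)] q := by
    intro q
    rw [show (PySem.Dict.ofList [(List.replicate goal.toList.length '.', (0:Int))]) =
        PySem.Dict.empty.insert (List.replicate goal.toList.length '.') 0 from rfl,
      PySem.Dict.get?_insert]
    by_cases h : q = List.replicate goal.toList.length '.'
    · rw [if_pos h, msz_cons, if_pos h.symm]
      rfl
    · rw [if_neg h, msz_cons, if_neg (fun hh => h hh.symm)]
      exact PySem.Dict.get?_empty (κ := List Char) (ν := Int) (k := q)
  have := Bfold bs.length bs [(List.replicate goal.toList.length '.', 0)]
    (PySem.Dict.ofList [(List.replicate goal.toList.length '.', (0 : Int))])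
    (PySem.Dict.nodup_keys_ofList _) h0
    (by rintro ps hps; simp only [List.mem_singleton] at hps; subst hps; simp)
  show min ((List.foldl (glRound bs.length) (PySem.Dict.ofList [(List.replicate goal.toList.length '.', 0)]) bs).getD goal.toList (bs.length:Int)) (bs.length:Int) = _
  rw [PySem.Dict.getD_eq_get?_getD, this goal.toList]

lemma applyC_prefix (g : List Char) (l r : List (List Int)) (S : List Nat)
    (h : ∀ i ∈ S, i < l.length) : applyC g (l ++ r) S = applyC g l S := by
  unfold applyC
  generalize (List.replicate g.length '.') = acc
  induction S generalizing acc with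
  | nil => rfl
  | cons i S ih =>
    simp only [List.foldl_cons]
    rw [List.getD_append _ _ _ _ (h i (List.mem_cons_self ..))]
    exact ih (fun j hj => h j (List.mem_cons_of_mem _ hj)) _

lemma applyC_append_singleton (g : List Char) (bs : List (List Int)) (S : List Nat) (j : Nat) :
    applyC g bs (S ++ [j]) = pyPush (applyC g bs S) (bs.getD j []) := by
  simp [applyC, List.foldl_append]

lemma mem_allP (g : List Char) :
    ∀ (l : List (List Int)) (ps : List Char × Int),
      ps ∈ l.foldl (fun acc b => step1 b acc) [(List.replicate g.length '.', 0)] ↔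
      ∃ S, Comb l.length S ∧ ps = (applyC g l S, (S.length : Int)) := by
  intro l
  induction l using List.reverseRecOn with
  | nil =>
    intro ps
    simp only [List.foldl_nil, List.mem_singleton]
    constructor
    · rintro rfl
      exact ⟨[], ⟨List.Pairwise.nil, by simp⟩, by simp [applyC]⟩
    · rintro ⟨S, ⟨_, hS⟩, rfl⟩
      have : S = [] := by
        cases S with
        | nil => rfl
        | cons i S => exact absurd (hS i (List.mem_cons_self ..)) (by simp)
      subst this
      simp [applyC]
  | append_singleton l b ih =>
    intro ps
    rw [List.foldl_append]
    simp only [List.foldl_cons, List.foldl_nil]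
    unfold step1
    rw [List.mem_append]
    constructor
    · rintro (hps | hps)
      · obtain ⟨S, ⟨hS1, hS2⟩, rfl⟩ := (ih ps).mp hps
        refine ⟨S, ⟨hS1, fun i hi => by have := hS2 i hi; simp only [List.length_append]; omega⟩, ?_⟩
        rw [applyC_prefix g l [b] S hS2]
      · rw [List.mem_map] at hps
        obtain ⟨p, hp, rfl⟩ := hps
        obtain ⟨S, ⟨hS1, hS2⟩, rfl⟩ := (ih p).mp hp
        refine ⟨S ++ [l.length], ⟨?_, ?_⟩, ?_⟩
        · rw [List.pairwise_append]
          exact ⟨hS1, List.pairwise_singleton _ _, fun i hi j hj => by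
            simp only [List.mem_singleton] at hj; subst hj; exact hS2 i hi⟩
        · intro i hi
          rcases List.mem_append.mp hi with hi | hi
          · have := hS2 i hi; simp only [List.length_append]; omega
          · simp only [List.mem_singleton] at hi; subst hi; simp
        · rw [applyC_append_singleton, applyC_prefix g l [b] S hS2]
          have hgd : (l ++ [b]).getD l.length [] = b := by
            rw [List.getD_eq_getElem?_getD]
            simp
          rw [hgd]
          simp
    · rintro ⟨S, ⟨hS1, hS2⟩, rfl⟩
      rcases List.eq_nil_or_concat' S with rfl | ⟨S', x, rfl⟩
      · left
        exact (ih _).mpr ⟨[], ⟨List.Pairwise.nil, by simp⟩, by simp [applyC_prefix g l [b] [] (by simp)]⟩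
      · have hxlt : x < l.length + 1 := by
          have := hS2 x (by simp)
          simpa using this
        have hS'lt : ∀ i ∈ S', i < x := by
          rw [List.pairwise_append] at hS1
          intro i hi
          exact hS1.2.2 i hi x (by simp)
        by_cases hx : x = l.length
        · subst hx
          right
          rw [List.mem_map]
          refine ⟨(applyC g l S', (S'.length : Int)), (ih _).mpr ⟨S', ⟨(List.pairwise_append.mp hS1).1, hS'lt⟩, rfl⟩, ?_⟩
          rw [applyC_append_singleton, applyC_prefix g l [b] S' hS'lt]
          have hgd : (l ++ [b]).getD l.length [] = b := by
            rw [List.getD_eq_getElem?_getD]; simp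
          rw [hgd]
          simp
        · left
          have hall : ∀ i ∈ S' ++ [x], i < l.length := by
            intro i hi
            rcases List.mem_append.mp hi with hi | hi
            · have := hS'lt i hi; omega
            · simp only [List.mem_singleton] at hi; subst hi; omega
          refine (ih _).mpr ⟨S' ++ [x], ⟨hS1, hall⟩, ?_⟩
          rw [applyC_prefix g l [b] _ hall]

lemma lt_of_last_lt (S : List Nat) (h : S.Pairwise (· < ·)) (j : Nat) (hne : S ≠ [])
    (hlast : S.getLast hne < j) : ∀ i ∈ S, i < j := by
  intro i hi
  have hsplit := List.dropLast_append_getLast hne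
  rw [← hsplit] at h hi
  rw [List.pairwise_append] at h
  rcases List.mem_append.mp hi with hi | hi
  · exact lt_trans (h.2.2 i hi _ (by simp)) hlast
  · simp only [List.mem_singleton] at hi; subst hi; exact hlast

lemma cond_iff (S : List Nat) (h : S.Pairwise (· < ·)) (j : Nat) :
    (¬ (S.map (fun i : Nat => (i : Int)) ≠ [] ∧
        ((j:Int) ≤ PySem.List.pyGetD (S.map (fun i : Nat => (i : Int))) (-1) 0))) ↔ ∀ i ∈ S, i < j := by
  by_cases hS : S = []
  · subst hS; simp
  · have hmapne : S.map (fun i : Nat => (i : Int)) ≠ [] := by simpa using hS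
    rw [PySem.List.pyGetD_neg_one _ _ hmapne]
    have hlast : (S.map (fun i : Nat => (i : Int))).getLast hmapne = ((S.getLast hS : Nat) : Int) := by
      rw [List.getLast_map]
    rw [hlast]
    constructor
    · intro hc
      have : (S.getLast hS) < j := by
        rcases not_and_or.mp hc with hc | hc
        · exact absurd hmapne hc
        · push Not at hc; exact_mod_cast hc
      exact lt_of_last_lt S h j hS this
    · intro hall
      rintro ⟨-, hle⟩
      have := hall _ (List.getLast_mem hS)
      omega

lemma mem_level (g : List Char) (bs : List (List Int)) :
    ∀ (k : Nat) (px : List Int × List Char),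
      px ∈ levelL g bs k ↔
      ∃ S, Comb bs.length S ∧ S.length = k ∧ px = (S.map (fun i : Nat => (i : Int)), applyC g bs S) := by
  intro k
  induction k with
  | zero =>
    intro px
    simp only [levelL, List.mem_singleton]
    constructor
    · rintro rfl
      exact ⟨[], ⟨List.Pairwise.nil, by simp⟩, rfl, by simp [applyC]⟩
    · rintro ⟨S, _, hlen, rfl⟩
      rw [List.length_eq_zero_iff] at hlen
      subst hlen
      simp [applyC]
  | succ k ih =>
    intro px
    show px ∈ glStep bs (levelL g bs k) ↔ _
    unfold glStep
    rw [List.mem_flatMap]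
    constructor
    · rintro ⟨py, hpy, hin⟩
      rw [List.mem_filterMap] at hin
      obtain ⟨ib, hib, heq⟩ := hin
      rw [PySem.List.mem_enumerate_iff] at hib
      obtain ⟨j, hj, rfl⟩ := hib
      obtain ⟨S, ⟨hS1, hS2⟩, hlen, rfl⟩ := (ih py).mp hpy
      simp only [zero_add] at heq ⊢
      by_cases hc : (S.map (fun i : Nat => (i : Int)) ≠ [] ∧
          ((j:Int) ≤ PySem.List.pyGetD (S.map (fun i : Nat => (i : Int))) (-1) 0))
      · rw [if_pos] at heq
        · exact absurd heq (by simp)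
        · exact hc
      · rw [if_neg hc] at heq
        have hall : ∀ i ∈ S, i < j := (cond_iff S hS1 j).mp hc
        refine ⟨S ++ [j], ⟨?_, ?_⟩, by simp [hlen], ?_⟩
        · rw [List.pairwise_append]
          exact ⟨hS1, List.pairwise_singleton _ _, fun i hi x hx => by
            simp only [List.mem_singleton] at hx; subst hx; exact hall i hi⟩
        · intro i hi
          rcases List.mem_append.mp hi with hi | hi
          · exact hS2 i hi
          · simp only [List.mem_singleton] at hi; subst hi; exact hj
        · cases heq
          rw [applyC_append_singleton]
          have : bs.getD j [] = bs[j] := List.getD_eq_getElem bs [] hj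
          rw [this]
          simp
    · rintro ⟨S, ⟨hS1, hS2⟩, hlen, rfl⟩
      rcases List.eq_nil_or_concat' S with rfl | ⟨S', j, rfl⟩
      · simp at hlen
      · have hS'1 : S'.Pairwise (· < ·) := (List.pairwise_append.mp hS1).1
        have hS'lt : ∀ i ∈ S', i < j := fun i hi =>
          (List.pairwise_append.mp hS1).2.2 i hi j (by simp)
        have hjlt : j < bs.length := hS2 j (by simp)
        refine ⟨(S'.map (fun i : Nat => (i : Int)), applyC g bs S'),
          (ih _).mpr ⟨S', ⟨hS'1, fun i hi => lt_trans (hS'lt i hi) hjlt⟩, by simpa using hlen, rfl⟩, ?_⟩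
      
        rw [List.mem_filterMap]
        refine ⟨((j : Int), bs[j]), ?_, ?_⟩
        · rw [PySem.List.mem_enumerate_iff]
          exact ⟨j, hjlt, by simp⟩
        · rw [if_neg]
          · rw [applyC_append_singleton]
            have : bs.getD j [] = bs[j] := List.getD_eq_getElem bs [] hjlt
            rw [this]
            simp
          · exact (cond_iff S' hS'1 j).mpr hS'lt

lemma hasA_iff (g : List Char) (bs : List (List Int)) (k : Nat) :
    ((levelL g bs k).any (fun px => px.2 == g) = true) ↔ HasGoal g bs k := by
  rw [List.any_eq_true]
  constructor
  · rintro ⟨px, hpx, hbeq⟩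
    obtain ⟨S, hc, hlen, rfl⟩ := (mem_level g bs k px).mp hpx
    rw [beq_iff_eq] at hbeq
    exact ⟨S, hc, hlen, hbeq⟩
  · rintro ⟨S, hc, hlen, happ⟩
    exact ⟨(S.map (fun i : Nat => (i : Int)), applyC g bs S),
      (mem_level g bs k _).mpr ⟨S, hc, hlen, rfl⟩, beq_iff_eq.mpr happ⟩

lemma msz_allP_some (g : List Char) (bs : List (List Int)) (m : Int)
    (h : msz (allP g bs) g = some m) :
    0 ≤ m ∧ HasGoal g bs m.toNat ∧ ∀ j, HasGoal g bs j → m ≤ (j : Int) := by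
  rw [msz_eq_some_iff] at h
  obtain ⟨⟨ps, hps, hp1, hp2⟩, hlb⟩ := h
  obtain ⟨S, hc, rfl⟩ := (mem_allP g bs ps).mp hps
  simp only at hp1 hp2
  subst hp2
  refine ⟨by positivity, ⟨S, hc, by simp, hp1⟩, ?_⟩
  intro j hj
  obtain ⟨T, hcT, hlenT, happT⟩ := hj
  have : (applyC g bs T, (T.length : Int)) ∈ allP g bs :=
    (mem_allP g bs _).mpr ⟨T, hcT, rfl⟩
  have := hlb _ this happT
  simp only at this
  omega

lemma hasGoal_msz (g : List Char) (bs : List (List Int)) (j : Nat) (h : HasGoal g bs j) :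
    ∃ m, msz (allP g bs) g = some m ∧ m ≤ (j : Int) := by
  obtain ⟨S, hc, hlen, happ⟩ := h
  have hmem : (applyC g bs S, (S.length : Int)) ∈ allP g bs :=
    (mem_allP g bs _).mpr ⟨S, hc, rfl⟩
  cases hm : msz (allP g bs) g with
  | none =>
    rw [msz_eq_none_iff] at hm
    exact absurd happ (hm _ hmem)
  | some m =>
    rw [msz_eq_some_iff] at hm
    refine ⟨m, rfl, ?_⟩
    have := hm.2 _ hmem happ
    simp only at this
    omega

lemma loopA (g : List Char) (bs : List (List Int)) :
    ∀ (f c : Nat), c + f = bs.length → (∀ j, j < c → ¬ HasGoal g bs j) →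
      glLoop g bs f (levelL g bs c) (c : Int) =
      min ((msz (allP g bs) g).getD (bs.length : Int)) (bs.length : Int) := by
  intro f
  induction f with
  | zero =>
    intro c hc hno
    show (c : Int) = _
    have hcn : c = bs.length := by omega
    subst hcn
    cases hm : msz (allP g bs) g with
    | none => simp
    | some m =>
      obtain ⟨hm0, hmg, _⟩ := msz_allP_some g bs m hm
      have : ¬ m.toNat < bs.length := fun hlt => hno _ hlt hmg
      simp only [Option.getD_some]
      omega
  | succ f ih =>
    intro c hc hno
    show (if (levelL g bs c).any (fun px => px.2 == g) = true then (c:Int)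
      else glLoop g bs f (glStep bs (levelL g bs c)) ((c:Int) + 1)) = _
    by_cases hA : (levelL g bs c).any (fun px => px.2 == g) = true
    · rw [if_pos hA]
      have hgoal := (hasA_iff g bs c).mp hA
      obtain ⟨m, hm, hmc⟩ := hasGoal_msz g bs c hgoal
      obtain ⟨hm0, hmg, _⟩ := msz_allP_some g bs m hm
      have : ¬ m.toNat < c := fun hlt => hno _ hlt hmg
      rw [hm]
      simp only [Option.getD_some]
      omega
    · rw [if_neg hA]
      have : glStep bs (levelL g bs c) = levelL g bs (c+1) := rfl
      rw [this, show ((c:Int) + 1) = ((c+1 : Nat) : Int) by push_cast; ring]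
      exact ih (c+1) (by omega) (fun j hj => by
        rcases Nat.lt_succ_iff_lt_or_eq.mp hj with hj | rfl
        · exact hno j hj
        · exact fun hg => hA ((hasA_iff g bs j).mpr hg))

-- ===== VERDICT (by name: the statement is the Claim_ definition above) =====
theorem get_lights_spec : Claim_equal_get_lights := by
  intro goal bs _
  unfold Spec_get_lights
  rw [B_value]
  show glLoop goal.toList bs bs.length (levelL goal.toList bs 0) ((0 : Nat) : Int) = _
  exact loopA goal.toList bs bs.length 0 (by omega) (by omega)
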